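-- pv_equiv track=rewrite | github.com/AshBrud/Mathex | formater.py | operator_isolator
-- ===== SOURCE A (Python) =====
-- operator = '+-*/='
--
-- def number_of_operator(exp): # return the number of operators found in a mathematical expression
--     # operator = '+-*/='
--     count = 0
--     for c in exp:
--         if operator.find(c) != -1:
--             count += 1
--     return count
--
-- def operator_isolator(exp): # Isolate operator operators with a specific charactor
--     # operator = '+-*/='
--     returned_exp = []
--     part = ''
--     operator_number = number_of_operator(exp)
--     operator_number_count = 0
--
--     for i in range(len(exp)):
--         c = exp[i]
--         part += c
--
--         if operator.find(c) != -1: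
--             returned_exp.append(part[:-1])
--             returned_exp.append(c)
--             operator_number_count += 1
--             part = ''
--         elif i == (len(exp) - 1) and operator_number_count == operator_number:
--             returned_exp.append(part)
--             continue
--     return returned_exp
-- ===== SOURCE B (Python) =====
-- OPS = '+-*/='
--
-- def operator_isolator(exp):
--     # Recursive divide at the first operator: emit the prefix and the operator,
--     # then tokenize the remainder; no operator counting, no index bookkeeping.
--     if not exp:
--         return []
--     for i, c in enumerate(exp):
--         if c in OPS:
--             return [exp[:i], c] + operator_isolator(exp[i + 1:])
--     return [exp]
-- ===== Notes on version B (the rewrite author's own statement) =====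
-- stated objective: simpler
-- what changed: Replaces the single indexed loop with accumulator string, pre-computed operator count and last-index/count-matched flush condition by a short recursion that splits at the first operator and tokenizes the rest.
import Mathlib
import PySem

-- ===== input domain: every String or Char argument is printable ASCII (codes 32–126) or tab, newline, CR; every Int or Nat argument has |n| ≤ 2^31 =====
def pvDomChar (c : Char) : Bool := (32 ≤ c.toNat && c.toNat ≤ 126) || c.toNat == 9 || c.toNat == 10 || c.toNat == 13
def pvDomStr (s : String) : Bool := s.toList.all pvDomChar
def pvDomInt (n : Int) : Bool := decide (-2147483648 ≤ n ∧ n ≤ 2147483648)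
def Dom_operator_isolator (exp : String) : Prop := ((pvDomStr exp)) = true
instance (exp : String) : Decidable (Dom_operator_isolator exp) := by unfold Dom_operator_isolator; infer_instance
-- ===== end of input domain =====

-- B replaces A's indexed loop + operator counting by a recursion splitting at the first operator (simpler; same results).

-- ===== PORT A =====
def pvOpStr : String := "+-*/="

def number_of_operator (exp : String) : Int :=
  exp.toList.foldl
    (fun count c => if PySem.Str.find pvOpStr (String.ofList [c]) ≠ -1 then count + 1 else count) 0

-- loop body of A's `for i in range(len(exp))`
def pvBodyA (full : List Char) (total : Int)
    (st : List String × List Char × Int) (i : Int) : List String × List Char × Int :=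
  let c := PySem.List.pyGetD full i ' '
  let part := st.2.1 ++ [c]
  if PySem.Str.find pvOpStr (String.ofList [c]) ≠ -1 then
    (st.1 ++ [String.ofList (PySem.List.slice part none (some (-1))), String.ofList [c]], [], st.2.2 + 1)
  else if i = (full.length : Int) - 1 ∧ st.2.2 = total then
    (st.1 ++ [String.ofList part], part, st.2.2)
  else
    (st.1, part, st.2.2)

def operator_isolator (exp : String) : List String :=
  let total := number_of_operator exp
  ((PySem.List.pyRange 0 (exp.toList.length) 1).foldl (pvBodyA exp.toList total) ([], [], 0)).1

-- ===== PORT B =====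
def pvOps : List Char := ['+', '-', '*', '/', '=']

-- the `for i, c in enumerate(exp): if c in OPS` search: index and char of the first operator
def pvAltFirstOp : List Char → Option (Nat × Char)
  | [] => none
  | c :: rest => if c ∈ pvOps then some (0, c) else (pvAltFirstOp rest).map (fun p => (p.1 + 1, p.2))

theorem pvAltFirstOp_lt : ∀ (cs : List Char) (i : Nat) (c : Char),
    pvAltFirstOp cs = some (i, c) → i < cs.length := by
  intro cs
  induction cs with
  | nil => intro i c h; simp [pvAltFirstOp] at h
  | cons x rest ih =>
    intro i c h
    simp only [pvAltFirstOp] at h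
    split at h
    · simp only [Option.some.injEq, Prod.mk.injEq] at h
      simp [← h.1]
    · cases hr : pvAltFirstOp rest with
      | none => rw [hr] at h; simp at h
      | some p =>
        rw [hr] at h
        simp only [Option.map_some, Option.some.injEq, Prod.mk.injEq] at h
        have := ih p.1 p.2 (by rw [hr])
        simp only [List.length_cons]
        omega

-- exp[:i] is take i, exp[i+1:] is drop (i+1) (i a Nat index in range: exact)
def pvAltGo (cs : List Char) : List String :=
  if cs.isEmpty then []
  else
    match h : pvAltFirstOp cs with
    | some (i, c) => String.ofList (cs.take i) :: String.ofList [c] :: pvAltGo (cs.drop (i + 1))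
    | none => [String.ofList cs]
termination_by cs.length
decreasing_by
  have := pvAltFirstOp_lt cs i c h
  simp only [List.length_drop]
  omega

def operator_isolator_alt (exp : String) : List String :=
  pvAltGo exp.toList

-- ===== PRECONDITION & SPEC =====
def Spec_operator_isolator (exp : String) (out : List String) : Prop := out = operator_isolator_alt exp
instance (exp : String) (out : List String) : Decidable (Spec_operator_isolator exp out) := by unfold Spec_operator_isolator; infer_instance

-- ===== CLAIM (what is proved, stated in full; the proofs are below) =====
def Claim_equal_operator_isolator : Prop := ∀ (exp : String), Dom_operator_isolator exp → Spec_operator_isolator exp (operator_isolator exp)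

-- ===== LEMMAS AND PROOFS =====

theorem pv_opStr_toList : pvOpStr.toList = pvOps := by rfl

theorem pv_isOp_iff (c : Char) :
    (PySem.Str.find pvOpStr (String.ofList [c]) ≠ -1) ↔ c ∈ pvOps := by
  rw [PySem.Str.find_ne_neg_one_iff]
  rw [show (String.ofList [c]).toList = [c] by simp, pv_opStr_toList]
  constructor
  · intro h
    exact h.mem (by simp)
  · intro h
    obtain ⟨s, t, hst⟩ := List.append_of_mem h
    exact ⟨s, t, by rw [hst]; simp⟩

-- structural form of A's loop (carries the full state)
def pvLoopA (total : Int) : List Char → List String × List Char × Int → List String × List Char × Int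
  | [], st => st
  | c :: rest, (ret, part, cnt) =>
    if c ∈ pvOps then
      pvLoopA total rest (ret ++ [String.ofList part, String.ofList [c]], [], cnt + 1)
    else if rest = [] ∧ cnt = total then
      pvLoopA total rest (ret ++ [String.ofList (part ++ [c])], part ++ [c], cnt)
    else
      pvLoopA total rest (ret, part ++ [c], cnt)

-- the common token stream both programs compute
def pvTokens : List Char → List Char → List String
  | _, [] => []
  | part, c :: rest =>
    if c ∈ pvOps then String.ofList part :: String.ofList [c] :: pvTokens [] rest
    else if rest = [] then [String.ofList (part ++ [c])]
    else pvTokens (part ++ [c]) rest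

theorem pv_bridge (full : List Char) (total : Int) :
    ∀ (suf pre : List Char) (st : List String × List Char × Int),
      full = pre ++ suf →
      (PySem.List.pyRange (pre.length) (full.length) 1).foldl (pvBodyA full total) st
        = pvLoopA total suf st := by
  intro suf
  induction suf with
  | nil =>
    intro pre st hfull
    subst hfull
    rw [PySem.List.pyRange_one_eq_nil (by simp)]
    simp [pvLoopA]
  | cons c rest ih =>
    intro pre st hfull
    subst hfull
    obtain ⟨ret, part, cnt⟩ := st
    have hlen : ((pre ++ c :: rest).length : Int) = (pre.length : Int) + 1 + rest.length := by
      simp; ring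
    rw [PySem.List.pyRange_one_cons (by rw [hlen]; omega)]
    rw [List.foldl_cons]
    have hget : PySem.List.pyGetD (pre ++ c :: rest) (pre.length) ' ' = c := by
      rw [PySem.List.pyGetD_natCast]
      simp [List.getD]
    have hiff : (((pre.length : Int) = ((pre ++ c :: rest).length : Int) - 1) ∧ cnt = total)
        ↔ (rest = [] ∧ cnt = total) := by
      constructor
      · rintro ⟨h1, h2⟩
        rw [hlen] at h1
        refine ⟨List.eq_nil_of_length_eq_zero (by omega), h2⟩
      · rintro ⟨h1, h2⟩
        subst h1
        refine ⟨by rw [hlen]; simp, h2⟩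
    have hbody : pvBodyA (pre ++ c :: rest) total (ret, part, cnt) (pre.length)
        = if c ∈ pvOps then (ret ++ [String.ofList part, String.ofList [c]], [], cnt + 1)
          else if rest = [] ∧ cnt = total then (ret ++ [String.ofList (part ++ [c])], part ++ [c], cnt)
          else (ret, part ++ [c], cnt) := by
      unfold pvBodyA
      simp only [hget, hiff, pv_isOp_iff, PySem.List.slice_to_neg_one, List.dropLast_concat]
    rw [hbody]
    have hre : (pre.length : Int) + 1 = ((pre ++ [c]).length : Int) := by simp
    by_cases hop : c ∈ pvOps
    · rw [if_pos hop, hre, ih (pre ++ [c]) _ (by simp)]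
      rw [pvLoopA, if_pos hop]
    · rw [if_neg hop]
      by_cases hr : rest = [] ∧ cnt = total
      · rw [if_pos hr, hre, ih (pre ++ [c]) _ (by simp)]
        rw [pvLoopA, if_neg hop, if_pos hr]
      · rw [if_neg hr, hre, ih (pre ++ [c]) _ (by simp)]
        rw [pvLoopA, if_neg hop, if_neg hr]

theorem pv_count (exp : String) :
    number_of_operator exp = (exp.toList.countP (fun c => c ∈ pvOps) : Int) := by
  unfold number_of_operator
  have : ∀ (cs : List Char) (k : Int),
      cs.foldl (fun count c => if PySem.Str.find pvOpStr (String.ofList [c]) ≠ -1 then count + 1 else count) k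
        = k + (cs.countP (fun c => c ∈ pvOps) : Int) := by
    intro cs
    induction cs with
    | nil => simp
    | cons c rest ih =>
      intro k
      simp only [List.foldl_cons, List.countP_cons, ih]
      by_cases hop : c ∈ pvOps
      · rw [if_pos ((pv_isOp_iff c).2 hop)]
        simp [hop]
        ring
      · rw [if_neg (by rw [pv_isOp_iff]; exact hop)]
        simp [hop]
  simpa using this exp.toList 0

theorem pv_loopA_tokens (total : Int) :
    ∀ (suf : List Char) (ret : List String) (part : List Char) (cnt : Int),
      cnt + (suf.countP (fun c => c ∈ pvOps) : Int) = total →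
      (pvLoopA total suf (ret, part, cnt)).1 = ret ++ pvTokens part suf := by
  intro suf
  induction suf with
  | nil => intro ret part cnt h; simp [pvLoopA, pvTokens]
  | cons c rest ih =>
    intro ret part cnt h
    rw [List.countP_cons] at h
    by_cases hop : c ∈ pvOps
    · rw [pvLoopA, if_pos hop]
      rw [ih _ [] (cnt + 1) (by simp [hop] at h ⊢; omega)]
      rw [pvTokens, if_pos hop]
      simp
    · by_cases hr : rest = []
      · have hcnt : cnt = total := by
          subst hr; simp [hop] at h; omega
        rw [pvLoopA, if_neg hop, if_pos (And.intro hr hcnt)]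
        subst hr
        rw [pvLoopA]
        rw [pvTokens, if_neg hop, if_pos rfl]
      · have hcond : ¬ (rest = [] ∧ cnt = total) := fun hc => hr hc.1
        rw [pvLoopA, if_neg hop, if_neg hcond]
        rw [ih _ (part ++ [c]) cnt (by simp [hop] at h ⊢; omega)]
        rw [pvTokens, if_neg hop, if_neg hr]

theorem pv_firstOp_none (cs : List Char) (h : ∀ c ∈ cs, c ∉ pvOps) :
    pvAltFirstOp cs = none := by
  induction cs with
  | nil => rfl
  | cons c rest ih =>
    rw [pvAltFirstOp, if_neg (h c (by simp))]
    rw [ih (fun x hx => h x (by simp [hx]))]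
    rfl

theorem pv_firstOp_at (part : List Char) (c : Char) (rest : List Char)
    (hfree : ∀ x ∈ part, x ∉ pvOps) (hop : c ∈ pvOps) :
    pvAltFirstOp (part ++ c :: rest) = some (part.length, c) := by
  induction part with
  | nil => simp [pvAltFirstOp, hop]
  | cons p ps ih =>
    rw [List.cons_append, pvAltFirstOp, if_neg (hfree p (by simp))]
    rw [ih (fun x hx => hfree x (by simp [hx]))]
    rfl

theorem pv_altGo_tokens :
    ∀ (cs part : List Char), (∀ x ∈ part, x ∉ pvOps) → (part = [] ∨ cs ≠ []) →
      pvAltGo (part ++ cs) = pvTokens part cs := by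
  intro cs
  induction cs with
  | nil =>
    intro part hfree hne
    rcases hne with h | h
    · subst h; simp [pvAltGo, pvTokens]
    · exact absurd rfl h
  | cons c rest ih =>
    intro part hfree _
    by_cases hop : c ∈ pvOps
    · have hfo := pv_firstOp_at part c rest hfree hop
      have htake : (part ++ c :: rest).take part.length = part := by
        simp
      have hdrop : (part ++ c :: rest).drop (part.length + 1) = rest := by
        rw [show part.length + 1 = (part ++ [c]).length by simp,
            show part ++ c :: rest = (part ++ [c]) ++ rest by simp]
        exact List.drop_left
      rw [pvAltGo, if_neg (by simp)]
      split
      · next i c' heq =>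
        rw [hfo] at heq
        obtain ⟨hi, hc⟩ := Option.some.inj heq |> Prod.mk.inj
        subst hi; subst hc
        rw [htake, hdrop, show pvAltGo rest = pvTokens [] rest by simpa using ih [] (by simp) (Or.inl rfl)]
        rw [pvTokens, if_pos hop]
      · next heq =>
        rw [hfo] at heq
        exact absurd heq (by simp)
    · by_cases hr : rest = []
      · subst hr
        rw [pvAltGo, if_neg (by simp)]
        have hnone : pvAltFirstOp (part ++ [c]) = none := by
          apply pv_firstOp_none
          intro x hx
          rcases List.mem_append.1 hx with h | h
          · exact hfree x h
          · simp at h; subst h; exact hop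
        split
        · next i c' heq =>
          rw [hnone] at heq
          exact absurd heq (by simp)
        · rw [pvTokens, if_neg hop, if_pos rfl]
      · have hsplit : part ++ c :: rest = (part ++ [c]) ++ rest := by simp
        rw [hsplit, ih (part ++ [c])
              (by intro x hx
                  rcases List.mem_append.1 hx with h | h
                  · exact hfree x h
                  · simp at h; subst h; exact hop)
              (Or.inr hr)]
        rw [pvTokens, if_neg hop, if_neg hr]

-- ===== VERDICT (by name: the statement is the Claim_ definition above) =====
theorem operator_isolator_spec : Claim_equal_operator_isolator := by
  intro exp _
  simp only [Spec_operator_isolator, operator_isolator, operator_isolator_alt]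
  have hb := pv_bridge exp.toList (number_of_operator exp) exp.toList [] ([], [], 0) (by simp)
  simp only [List.length_nil, Nat.cast_zero] at hb
  rw [hb]
  rw [pv_loopA_tokens (number_of_operator exp) exp.toList [] [] 0 (by rw [pv_count]; simp)]
  rw [← pv_altGo_tokens exp.toList [] (by simp) (Or.inl rfl)]
  simp
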